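-- pv_equiv track=rewrite | github.com/nestauk/industrial-taxonomy | notebooks/dev/02_gr_sic_clustering.py | sic_description_preprocessing
-- ===== SOURCE A (Python) =====
-- def sic_description_preprocessing(descriptions):
--     processed = []
--     for description in descriptions:
--         description = (description
--                        .replace('/', ' ')
--                        .replace('n.e.c.', '')
--                        .replace('(', '')
--                        .replace(')', '')
--                        .replace('other', '')
--                        .replace('-', '')
--                       )
--
--         tokens = description.split(' ')
--         for exc in ['except', 'excluding']:
--             if exc in tokens:
--                 except_index = tokens.index(exc)
--                 tokens = tokens[:except_index]
--                 description = ' '.join(tokens)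
--
--         processed.append(description)
--
--     return processed
-- ===== SOURCE B (Python) =====
-- _REPLACEMENTS = [('/', ' '), ('n.e.c.', ''), ('(', ''), (')', ''), ('other', ''), ('-', '')]
-- _SENTINELS = ('except', 'excluding')
--
--
-- def _clean(description):
--     for old, new in _REPLACEMENTS:
--         description = description.replace(old, new)
--     tokens = description.split(' ')
--     cut = next((i for i, tok in enumerate(tokens) if tok in _SENTINELS), None)
--     return description if cut is None else ' '.join(tokens[:cut])
--
--
-- def sic_description_preprocessing(descriptions):
--     return [_clean(d) for d in descriptions]
-- ===== Notes on version B (the rewrite author's own statement) =====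
-- stated objective: simpler
-- what changed: A's two sequential '.index'+slice truncation passes (first for 'except', then re-scanning the already-truncated token list for 'excluding') are replaced by a single scan that finds the earliest sentinel token and cuts once; the replace chain becomes a loop over a replacement table and the output list a comprehension.
import Mathlib
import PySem

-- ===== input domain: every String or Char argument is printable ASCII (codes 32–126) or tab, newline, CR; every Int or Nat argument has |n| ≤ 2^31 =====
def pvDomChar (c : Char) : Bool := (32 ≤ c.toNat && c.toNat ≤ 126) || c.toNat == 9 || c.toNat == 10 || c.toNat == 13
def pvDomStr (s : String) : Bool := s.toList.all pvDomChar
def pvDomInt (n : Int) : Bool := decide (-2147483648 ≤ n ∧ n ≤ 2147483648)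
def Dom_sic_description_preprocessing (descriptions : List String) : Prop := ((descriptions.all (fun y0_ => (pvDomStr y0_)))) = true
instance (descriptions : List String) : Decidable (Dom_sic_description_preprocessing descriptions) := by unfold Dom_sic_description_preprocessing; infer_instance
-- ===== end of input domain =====

-- B replaces A's two sequential '.index'+slice truncation passes by a single scan for the
-- first sentinel token ('simpler': one cut at the earliest sentinel instead of two passes).

-- ===== PORT A =====
-- the replace chain of A, literal transliteration
def pvChainA (description : String) : String :=
  PySem.Str.replace (PySem.Str.replace (PySem.Str.replace (PySem.Str.replace
    (PySem.Str.replace (PySem.Str.replace description "/" " ") "n.e.c." "")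
    "(" "") ")" "") "other" "") "-" ""

-- A's truncation loop:
-- for exc in ['except', 'excluding']: if exc in tokens: tokens = tokens[:tokens.index(exc)]; description = ' '.join(tokens)
def pvTruncA (tokens : List String) (description : String) : String :=
  ((["except", "excluding"] : List String).foldl
    (fun st exc =>
      if st.1.contains exc then
        let exceptIndex := (PySem.List.index? st.1 exc).getD 0   -- .index succeeds: exc ∈ tokens
        let tokens := st.1.take exceptIndex                       -- tokens[:i], i ≥ 0
        (tokens, PySem.Str.join " " tokens)
      else st)
    (tokens, description)).2

-- per-description body of A's loop
def pvProcessOneA (description : String) : String :=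
  let d := pvChainA description
  let tokens := (PySem.Str.split? d " ").getD []   -- sep " " ≠ "", so split? is always some
  pvTruncA tokens d

def sic_description_preprocessing (descriptions : List String) : List String :=
  descriptions.foldl (fun processed description => processed ++ [pvProcessOneA description]) []

-- ===== PORT B =====
def pvReplacements : List (String × String) :=
  [("/", " "), ("n.e.c.", ""), ("(", ""), (")", ""), ("other", ""), ("-", "")]

-- B's single scan: cut = next((i for i, tok in enumerate(tokens) if tok in _SENTINELS), None)
def pvCut (tokens : List String) (description : String) : String :=
  match tokens.findIdx? (fun tok => tok == "except" || tok == "excluding") with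
  | none => description
  | some cut => PySem.Str.join " " (tokens.take cut)

def pvClean (description : String) : String :=
  let d := pvReplacements.foldl (fun s p => PySem.Str.replace s p.1 p.2) description
  let tokens := (PySem.Str.split? d " ").getD []   -- sep " " ≠ "", so split? is always some
  pvCut tokens d

def sic_description_preprocessing_alt (descriptions : List String) : List String :=
  descriptions.map pvClean

-- ===== PRECONDITION & SPEC =====
def Spec_sic_description_preprocessing (descriptions : List String) (out : List String) : Prop := out = sic_description_preprocessing_alt descriptions
instance (descriptions : List String) (out : List String) : Decidable (Spec_sic_description_preprocessing descriptions out) := by unfold Spec_sic_description_preprocessing; infer_instance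

-- ===== CLAIM (what is proved, stated in full; the proofs are below) =====
def Claim_equal_sic_description_preprocessing : Prop := ∀ (descriptions : List String), Dom_sic_description_preprocessing descriptions → Spec_sic_description_preprocessing descriptions (sic_description_preprocessing descriptions)

-- ===== LEMMAS AND PROOFS =====

theorem pv_take_findIdx_eq_takeWhile {α : Type} (p : α → Bool) (l : List α) :
    l.take (l.findIdx p) = l.takeWhile (fun x => !p x) := by
  induction l with
  | nil => rfl
  | cons a l ih =>
    by_cases h : p a = true <;> simp [List.findIdx_cons, h, ih]

theorem pv_idxOf?_eq_some (a : String) (l : List String) (h : a ∈ l) :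
    List.idxOf? a l = some (l.idxOf a) := by
  induction l with
  | nil => simp at h
  | cons b l ih =>
    by_cases hb : b = a
    · simp [List.idxOf?_cons, hb]
    · have hm : a ∈ l := by
        rcases List.mem_cons.mp h with h' | h'
        · exact absurd h'.symm hb
        · exact h'
      simp [List.idxOf?_cons, hb, ih hm, beq_iff_eq]

theorem pv_take_idxOf_eq_takeWhile (a : String) (l : List String) :
    l.take (l.idxOf a) = l.takeWhile (fun x => !(x == a)) := by
  have : l.idxOf a = l.findIdx (· == a) := rfl
  rw [this, pv_take_findIdx_eq_takeWhile]

theorem pv_takeWhile_of_not_mem (a : String) (l : List String) (h : a ∉ l) :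
    l.takeWhile (fun x => !(x == a)) = l := by
  rw [List.takeWhile_eq_self_iff]
  intro x hx
  simp only [Bool.not_eq_eq_eq_not, Bool.not_true, beq_eq_false_iff_ne]
  exact fun e => h (e ▸ hx)

theorem pv_takeWhile_pair (ts : List String) :
    (ts.takeWhile (fun x => !(x == "except"))).takeWhile (fun x => !(x == "excluding"))
      = ts.takeWhile (fun x => !(x == "except" || x == "excluding")) := by
  rw [List.takeWhile_takeWhile]
  congr 1
  funext x
  by_cases h1 : x = "except" <;> by_cases h2 : x = "excluding" <;> simp [h1, h2]

theorem pv_trunc_eq (ts : List String) (d : String) :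
    pvTruncA ts d = pvCut ts d := by
  unfold pvTruncA pvCut
  simp only [List.foldl_cons, List.foldl_nil, PySem.List.index?]
  cases hf : ts.findIdx? (fun tok => tok == "except" || tok == "excluding") with
  | none =>
    have hall := List.findIdx?_eq_none_iff.mp hf
    have h1 : "except" ∉ ts := fun hm => by simpa using hall _ hm
    have h2 : "excluding" ∉ ts := fun hm => by simpa using hall _ hm
    simp [h1, h2]
  | some cut =>
    have hcut : ts.findIdx (fun tok => tok == "except" || tok == "excluding") = cut :=
      (List.findIdx?_eq_some_iff_findIdx_eq.mp hf).2
    have hr : ts.take cut = ts.takeWhile (fun x => !(x == "except" || x == "excluding")) := by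
      rw [← hcut, pv_take_findIdx_eq_takeWhile]
    by_cases h1m : "except" ∈ ts
    · have ht1 : ts.take ((List.idxOf? "except" ts).getD 0)
          = ts.takeWhile (fun x => !(x == "except")) := by
        rw [pv_idxOf?_eq_some _ _ h1m]
        exact pv_take_idxOf_eq_takeWhile _ _
      by_cases h2m : "excluding" ∈ ts.takeWhile (fun x => !(x == "except"))
      · have ht2 : (ts.takeWhile (fun x => !(x == "except"))).take
            ((List.idxOf? "excluding" (ts.takeWhile (fun x => !(x == "except")))).getD 0)
            = ts.takeWhile (fun x => !(x == "except" || x == "excluding")) := by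
          rw [pv_idxOf?_eq_some _ _ h2m]
          simp only [Option.getD_some]
          rw [pv_take_idxOf_eq_takeWhile, pv_takeWhile_pair]
        simp [h1m, h2m, ht1, ht2, hr]
      · have hkeep : ts.takeWhile (fun x => !(x == "except"))
            = ts.takeWhile (fun x => !(x == "except" || x == "excluding")) := by
          rw [← pv_takeWhile_pair, pv_takeWhile_of_not_mem _ _ h2m]
        have h2m' : "excluding" ∉ ts.takeWhile (fun x => !(x == "except" || x == "excluding")) :=
          hkeep ▸ h2m
        simp only [Bool.not_or] at h2m'
        simp [h1m, ht1, hkeep, h2m', hr]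
    · have hfix : ts.takeWhile (fun x => !(x == "except")) = ts :=
        pv_takeWhile_of_not_mem _ _ h1m
      by_cases h2m : "excluding" ∈ ts
      · have ht2 : ts.take ((List.idxOf? "excluding" ts).getD 0)
            = ts.takeWhile (fun x => !(x == "except" || x == "excluding")) := by
          rw [pv_idxOf?_eq_some _ _ h2m]
          simp only [Option.getD_some]
          rw [pv_take_idxOf_eq_takeWhile, ← pv_takeWhile_pair, hfix]
        simp [h1m, h2m, ht2, hr]
      · exfalso
        have hall : ∀ x ∈ ts, (x == "except" || x == "excluding") = false := by
          intro x hx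
          simp only [Bool.or_eq_false_iff, beq_eq_false_iff_ne]
          exact ⟨fun e => h1m (e ▸ hx), fun e => h2m (e ▸ hx)⟩
        rw [List.findIdx?_eq_none_iff.mpr hall] at hf
        simp at hf

theorem pv_d_eq (s : String) :
    pvReplacements.foldl (fun t p => PySem.Str.replace t p.1 p.2) s = pvChainA s := rfl

theorem pv_processOne_eq (description : String) : pvProcessOneA description = pvClean description := by
  unfold pvProcessOneA pvClean
  rw [pv_d_eq]
  exact pv_trunc_eq _ _

theorem pv_foldl_eq_map (l : List String) :
    ∀ acc, l.foldl (fun a x => a ++ [pvProcessOneA x]) acc = acc ++ l.map pvClean := by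
  induction l with
  | nil => intro acc; simp
  | cons b l ih =>
    intro acc
    rw [List.foldl_cons, ih, pv_processOne_eq]
    simp

-- ===== VERDICT (by name: the statement is the Claim_ definition above) =====
theorem sic_description_preprocessing_spec : Claim_equal_sic_description_preprocessing := by
  intro descriptions _
  unfold Spec_sic_description_preprocessing sic_description_preprocessing sic_description_preprocessing_alt
  simpa using pv_foldl_eq_map descriptions []
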